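-- pv_equiv track=rewrite | github.com/weltonvaz/beecrowd | 1973a.py | calculate_attacks_and_remaining_total
-- ===== SOURCE A (Python) =====
-- def calculate_attacks_and_remaining_total(n, nums):
--     pos, soma, total, continua = 0, 0, sum(nums), True
--
--     for i, num in enumerate(nums):
--         if num % 2 == 0 and continua:
--             ataques = i + 1
--             soma += ((i * 2) + 1) - pos
--             continua = False
--         elif num - 1 == 0 and continua:
--             pos = i + 1
--
--     if soma > 0:
--         total -= soma
--     else:
--         ataques = n
--         total -= ataques
--
--     return ataques, total
-- ===== SOURCE B (Python) =====
-- def calculate_attacks_and_remaining_total(n, nums):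
--     total = sum(nums)
--     # Right-to-left fold: r summarises the current suffix as (ataques, pos)
--     # (attack count within the suffix, and 1-based position of the last 1
--     # strictly before the first even of the suffix; 0 if none).
--     r = None
--     for x in reversed(nums):
--         if x % 2 == 0:
--             r = (1, 0)
--         elif r is not None:
--             a, p = r
--             r = (a + 1, p + 1 if p > 0 or x == 1 else 0)
--     if r is None:
--         return n, total - n
--     a, p = r
--     return a, total - (2 * a - 1 - p)
-- ===== Notes on version B (the rewrite author's own statement) =====
-- stated objective: alternative
-- what changed: Replaces A's forward scan with pos/soma/continua mutable flags by a right-to-left fold that composes per-suffix summaries (attack count, position of the last 1 before the first even), from which the final pair is read off in one arithmetic step.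
import Mathlib
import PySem

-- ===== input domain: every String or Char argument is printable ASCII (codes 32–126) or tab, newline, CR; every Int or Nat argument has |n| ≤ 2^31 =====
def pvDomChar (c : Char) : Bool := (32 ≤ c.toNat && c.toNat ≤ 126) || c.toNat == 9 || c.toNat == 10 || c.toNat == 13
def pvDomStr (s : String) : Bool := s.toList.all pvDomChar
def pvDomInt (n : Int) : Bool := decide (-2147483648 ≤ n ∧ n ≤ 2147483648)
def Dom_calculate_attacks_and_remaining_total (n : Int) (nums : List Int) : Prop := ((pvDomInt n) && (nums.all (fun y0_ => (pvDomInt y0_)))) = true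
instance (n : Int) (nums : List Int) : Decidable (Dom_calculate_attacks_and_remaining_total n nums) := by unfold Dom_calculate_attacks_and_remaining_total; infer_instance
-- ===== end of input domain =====

-- B replaces A's forward stateful scan (pos/soma/continua flags) by a right-to-left fold that
-- summarises each suffix as (attack count, last-1 position before the first even); objective: alternative.

-- ===== PORT A =====
def pvStepA (s : Int × Int × Bool × Int) (p : Int × Int) : Int × Int × Bool × Int :=
  if PySem.Int.mod p.2 2 == 0 && s.2.2.1 then
    (s.1, s.2.1 + ((p.1 * 2) + 1) - s.1, false, p.1 + 1)
  else if p.2 - 1 == 0 && s.2.2.1 then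
    (p.1 + 1, s.2.1, s.2.2.1, s.2.2.2)
  else s

def calculate_attacks_and_remaining_total (n : Int) (nums : List Int) : Int × Int :=
  -- Python's `ataques` starts unbound; the port seeds it with 0, which is never read
  -- (the final branch reads it only when soma > 0, i.e. after the even branch set it).
  let total := nums.sum
  let s := (PySem.List.enumerate nums 0).foldl pvStepA (0, 0, true, 0)
  if s.2.1 > 0 then (s.2.2.2, total - s.2.1) else (n, total - n)

-- ===== PORT B =====
-- step of Source B's `for x in reversed(nums)` loop: fold the next earlier element into the suffix summary
def pvSuffixStep (r : Option (Int × Int)) (x : Int) : Option (Int × Int) :=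
  if PySem.Int.mod x 2 == 0 then some (1, 0)
  else match r with
    | none => none
    | some (a, p) => some (a + 1, if 0 < p ∨ x = 1 then p + 1 else 0)

def calculate_attacks_and_remaining_total_alt (n : Int) (nums : List Int) : Int × Int :=
  let total := nums.sum
  match nums.reverse.foldl pvSuffixStep none with
  | none => (n, total - n)
  | some (a, p) => (a, total - (2 * a - 1 - p))

-- ===== PRECONDITION & SPEC =====
def Spec_calculate_attacks_and_remaining_total (n : Int) (nums : List Int) (out : Int × Int) : Prop := out = calculate_attacks_and_remaining_total_alt n nums
instance (n : Int) (nums : List Int) (out : Int × Int) : Decidable (Spec_calculate_attacks_and_remaining_total n nums out) := by unfold Spec_calculate_attacks_and_remaining_total; infer_instance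

-- ===== CLAIM (what is proved, stated in full; the proofs are below) =====
def Claim_equal_calculate_attacks_and_remaining_total : Prop := ∀ (n : Int) (nums : List Int), Dom_calculate_attacks_and_remaining_total n nums → Spec_calculate_attacks_and_remaining_total n nums (calculate_attacks_and_remaining_total n nums)

-- ===== LEMMAS AND PROOFS =====

-- B's reversed-list fold, unfolded once at the head of the original list
lemma pvGo_cons (x : Int) (xs : List Int) :
    (x :: xs).reverse.foldl pvSuffixStep none = pvSuffixStep (xs.reverse.foldl pvSuffixStep none) x := by
  simp [List.foldl_reverse]

-- bounds on B's suffix summary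
lemma pvGo_bounds (xs : List Int) {a p : Int}
    (h : xs.reverse.foldl pvSuffixStep none = some (a, p)) : 1 ≤ a ∧ 0 ≤ p ∧ p ≤ a - 1 := by
  induction xs generalizing a p with
  | nil => simp at h
  | cons x xs ih =>
    rw [pvGo_cons] at h
    simp only [pvSuffixStep] at h
    split at h
    · simp at h; omega
    · cases hr : xs.reverse.foldl pvSuffixStep none with
      | none => rw [hr] at h; simp at h
      | some q =>
        rw [hr] at h
        obtain ⟨a', p'⟩ := q
        simp only [Option.some.injEq, Prod.mk.injEq] at h
        have := ih hr
        obtain ⟨ha, hp⟩ := h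
        subst ha; subst hp
        split <;> omega

-- once continua is false, A's loop no longer changes its state
lemma pvFrozen (l : List (Int × Int)) (q s b : Int) :
    l.foldl pvStepA (q, s, false, b) = (q, s, false, b) := by
  induction l with
  | nil => rfl
  | cons p l ih => simp [List.foldl, pvStepA, ih]

-- the last-1 tracking of A, needed in full only in the no-even case
def pvPosStep (acc : Int) (p : Int × Int) : Int :=
  if p.2 == 1 then p.1 + 1 else acc

-- main characterisation: A's forward fold in terms of B's suffix summary
lemma pvMain (xs : List Int) (k pos0 a0 : Int) :
    (PySem.List.enumerate xs k).foldl pvStepA (pos0, 0, true, a0) =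
      match xs.reverse.foldl pvSuffixStep none with
      | none => ((PySem.List.enumerate xs k).foldl pvPosStep pos0, 0, true, a0)
      | some (a, p) =>
          ((if 0 < p then p + k else pos0),
           2 * (k + a) - 1 - (if 0 < p then p + k else pos0), false, k + a) := by
  induction xs generalizing k pos0 with
  | nil => rfl
  | cons x xs ih =>
    rw [pvGo_cons]
    simp only [PySem.List.enumerate_cons, List.foldl_cons, pvSuffixStep]
    by_cases hx : (PySem.Int.mod x 2 == 0) = true
    · rw [if_pos hx]
      have h1 : pvStepA (pos0, 0, true, a0) (k, x) = (pos0, 0 + (k * 2 + 1) - pos0, false, k + 1) := by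
        simp only [pvStepA]; rw [hx]; rfl
      rw [h1, pvFrozen]
      show (pos0, 0 + (k * 2 + 1) - pos0, false, k + 1)
          = ((if (0:Int) < 0 then (0:Int) + k else pos0),
             2 * (k + 1) - 1 - (if (0:Int) < 0 then (0:Int) + k else pos0), false, k + 1)
      rw [if_neg (lt_irrefl 0)]
      refine Prod.ext rfl (Prod.ext ?_ rfl)
      show 0 + (k * 2 + 1) - pos0 = 2 * (k + 1) - 1 - pos0
      ring
    · rw [if_neg hx]
      have hx' : (PySem.Int.mod x 2 == 0) = false := by simpa using hx
      by_cases h1 : x = 1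
      · subst h1
        have hstep : pvStepA (pos0, 0, true, a0) (k, (1:Int)) = (k + 1, 0, true, a0) := by
          simp only [pvStepA]; rw [hx']; norm_num
        have hpstep : pvPosStep pos0 (k, (1:Int)) = k + 1 := by simp [pvPosStep]
        rw [hstep, hpstep, ih]
        cases hr : xs.reverse.foldl pvSuffixStep none with
        | none => rfl
        | some q =>
          obtain ⟨a, p⟩ := q
          have hb := pvGo_bounds xs hr
          simp only [or_true, if_true]
          split_ifs <;> (rw [Prod.mk.injEq, Prod.mk.injEq, Prod.mk.injEq]; exact ⟨by omega, by omega, rfl, by omega⟩)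
      · have e1 : (x - 1 == 0) = false := by simp [sub_eq_zero, h1]
        have e2 : (x == 1) = false := by simp [h1]
        have hstep : pvStepA (pos0, 0, true, a0) (k, x) = (pos0, 0, true, a0) := by
          simp only [pvStepA]; rw [hx', e1]; rfl
        have hpstep : pvPosStep pos0 (k, x) = pos0 := by simp [pvPosStep, e2]
        rw [hstep, hpstep, ih]
        cases hr : xs.reverse.foldl pvSuffixStep none with
        | none => rfl
        | some q =>
          obtain ⟨a, p⟩ := q
          have hb := pvGo_bounds xs hr
          simp only [h1, or_false]
          split_ifs <;> (rw [Prod.mk.injEq, Prod.mk.injEq, Prod.mk.injEq]; exact ⟨by omega, by omega, rfl, by omega⟩)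

-- ===== VERDICT (by name: the statement is the Claim_ definition above) =====
theorem calculate_attacks_and_remaining_total_spec : Claim_equal_calculate_attacks_and_remaining_total := by
  intro n nums _
  unfold Spec_calculate_attacks_and_remaining_total
  unfold calculate_attacks_and_remaining_total calculate_attacks_and_remaining_total_alt
  rw [pvMain]
  cases hr : nums.reverse.foldl pvSuffixStep none with
  | none => simp
  | some q =>
    obtain ⟨a, p⟩ := q
    have hb := pvGo_bounds nums hr
    simp only
    split_ifs <;> (rw [Prod.mk.injEq]; exact ⟨by omega, by omega⟩)
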